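-- pv_equiv track=rewrite | github.com/Nickbohm555/web-agent | backend/agent/runtime_policy.py | collapse_domains
-- ===== SOURCE A (Python) =====
-- def collapse_domains(domains: list[str]) -> list[str]:
--     collapsed: list[str] = []
--     for domain in sorted(domains):
--         if any(domain == existing or domain.endswith(f".{existing}") for existing in collapsed):
--             continue
--         collapsed = [
--             existing
--             for existing in collapsed
--             if not existing.endswith(f".{domain}")
--         ]
--         collapsed.append(domain)
--     return collapsed
-- ===== SOURCE B (Python) =====
-- def collapse_domains(domains: list[str]) -> list[str]:
--     present = set(domains)
--     kept = [d for d in present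
--             if not any(d[i + 1:] in present
--                        for i, ch in enumerate(d) if ch == '.')]
--     return sorted(kept)
-- ===== Notes on version B (the rewrite author's own statement) =====
-- stated objective: faster
-- what changed: Instead of rescanning and rebuilding the growing collapsed list for every domain of the sorted input, B builds one hash set of all domains, keeps exactly the domains none of whose dot-separated proper suffixes is in that set, and sorts the kept ones once.
import Mathlib
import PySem

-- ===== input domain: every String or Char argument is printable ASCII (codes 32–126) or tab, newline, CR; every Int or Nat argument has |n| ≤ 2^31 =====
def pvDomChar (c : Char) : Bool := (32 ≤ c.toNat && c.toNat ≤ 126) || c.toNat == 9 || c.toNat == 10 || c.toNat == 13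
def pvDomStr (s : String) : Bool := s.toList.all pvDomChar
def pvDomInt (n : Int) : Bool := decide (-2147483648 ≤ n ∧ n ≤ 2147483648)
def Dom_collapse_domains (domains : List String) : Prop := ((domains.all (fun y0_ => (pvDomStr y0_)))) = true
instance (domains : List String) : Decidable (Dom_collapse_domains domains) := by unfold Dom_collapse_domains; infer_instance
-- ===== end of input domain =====

-- B replaces A's rescans of the growing collapsed list by one membership test of each domain's
-- dot-suffixes against set(domains), then a single sort of the kept domains (objective: faster).

-- ===== PORT A =====
def collapse_domains (domains : List String) : List String :=
  (PySem.List.sorted domains (fun x => x) false).foldl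
    (fun collapsed domain =>
      if collapsed.any (fun existing =>
            domain == existing || PySem.Str.endswith domain ("." ++ existing)) then
        collapsed
      else
        collapsed.filter (fun existing =>
            ! PySem.Str.endswith existing ("." ++ domain)) ++ [domain])
    []

-- ===== PORT B =====
def collapse_domains_alt (domains : List String) : List String :=
  let present : PySem.Set String := PySem.Set.ofList domains
  let kept : List String := present.filter (fun d =>
    ! (PySem.List.enumerate d.toList).any (fun ic =>
        ic.2 == '.' && PySem.Set.contains present (PySem.Str.slice d (some (ic.1 + 1)) none)))
  PySem.List.sorted kept (fun x => x) false

-- ===== PRECONDITION & SPEC =====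
def Spec_collapse_domains (domains : List String) (out : List String) : Prop := out = collapse_domains_alt domains
instance (domains : List String) (out : List String) : Decidable (Spec_collapse_domains domains out) := by unfold Spec_collapse_domains; infer_instance

-- ===== CLAIM (what is proved, stated in full; the proofs are below) =====
def Claim_equal_collapse_domains : Prop := ∀ (domains : List String), Dom_collapse_domains domains → Spec_collapse_domains domains (collapse_domains domains)

-- ===== LEMMAS AND PROOFS =====

-- e is a proper "dot ancestor" of x : x ends with "." ++ e
def ancP (x e : String) : Prop := ('.' :: e.toList) <:+ x.toList

-- x has no proper dot-ancestor among S
def MinP (x : String) (S : List String) : Prop := ∀ e ∈ S, ¬ ancP x e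

-- A's loop body, named for the proofs (definitionally the lambda in the port)
def stepA (collapsed : List String) (domain : String) : List String :=
  if collapsed.any (fun existing =>
        domain == existing || PySem.Str.endswith domain ("." ++ existing)) then
    collapsed
  else
    collapsed.filter (fun existing =>
        ! PySem.Str.endswith existing ("." ++ domain)) ++ [domain]

theorem collapse_domains_eq (domains : List String) :
    collapse_domains domains = (PySem.List.sorted domains (fun x => x) false).foldl stepA [] := rfl

theorem anc_length {x e : String} (h : ancP x e) : e.toList.length < x.toList.length := by
  have := h.length_le
  simp only [List.length_cons] at this
  omega

theorem anc_irrefl (x : String) : ¬ ancP x x := fun h => by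
  have := anc_length h; omega

theorem anc_trans {x d e : String} (h1 : ancP x d) (h2 : ancP d e) : ancP x e := by
  unfold ancP at *
  exact h2.trans ((List.suffix_cons '.' d.toList).trans h1)

theorem cond_iff (d e : String) :
    (d == e || PySem.Str.endswith d ("." ++ e)) = true ↔ d = e ∨ ancP d e := by
  simp [ancP, PySem.Chars.endswith_iff]

theorem fcond_iff (e d : String) :
    (! PySem.Str.endswith e ("." ++ d)) = true ↔ ¬ ancP e d := by
  simp [ancP, Bool.eq_false_iff, PySem.Chars.endswith_iff]

-- every member of p has a MINIMAL ancestor-or-self in p (strong induction on the length)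
theorem exists_min (p : List String) (n : Nat) (e : String) (he : e ∈ p)
    (hn : e.toList.length ≤ n) : ∃ f ∈ p, MinP f p ∧ (f = e ∨ ancP e f) := by
  induction n generalizing e with
  | zero =>
    refine ⟨e, he, ?_, Or.inl rfl⟩
    intro g hg hanc
    have := anc_length hanc; omega
  | succ n ih =>
    by_cases hmin : MinP e p
    · exact ⟨e, he, hmin, Or.inl rfl⟩
    · have hex : ∃ g ∈ p, ancP e g := by
        unfold MinP at hmin; push Not at hmin; exact hmin
      obtain ⟨g, hg, hanc⟩ := hex
      have hlen : g.toList.length ≤ n := by have := anc_length hanc; omega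
      obtain ⟨f, hf, hfmin, hcase⟩ := ih g hg hlen
      refine ⟨f, hf, hfmin, Or.inr ?_⟩
      rcases hcase with rfl | h2
      · exact hanc
      · exact anc_trans hanc h2

-- the loop invariant of A's fold
theorem fold_inv (rest : List String) : ∀ (p acc : List String),
    (p ++ rest).Pairwise (· ≤ ·) →
    (∀ x, x ∈ acc ↔ x ∈ p ∧ MinP x p) →
    acc.Pairwise (· < ·) →
    (∀ x, x ∈ rest.foldl stepA acc ↔ x ∈ p ++ rest ∧ MinP x (p ++ rest)) ∧
      (rest.foldl stepA acc).Pairwise (· < ·) := by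
  induction rest with
  | nil =>
    intro p acc _ hm hp
    rw [List.foldl_nil]
    exact ⟨by simpa using hm, hp⟩
  | cons d rest ih =>
    intro p acc hs hm hp
    have hassoc : p ++ d :: rest = (p ++ [d]) ++ rest := by simp
    have hs' : ((p ++ [d]) ++ rest).Pairwise (· ≤ ·) := by rw [← hassoc]; exact hs
    have hle : ∀ a ∈ p, a ≤ d := by
      intro a ha
      exact (List.pairwise_append.mp hs).2.2 a ha d (by simp)
    rw [List.foldl_cons, hassoc]
    by_cases hskip : acc.any (fun existing =>
        d == existing || PySem.Str.endswith d ("." ++ existing)) = true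
    · -- skip: d is covered by something already collapsed
      obtain ⟨e, he, hcond⟩ := List.any_eq_true.mp hskip
      rw [cond_iff] at hcond
      obtain ⟨hep, hemin⟩ := (hm e).mp he
      have hstep : stepA acc d = acc := by unfold stepA; rw [if_pos hskip]
      rw [hstep]
      refine ih (p ++ [d]) acc hs' ?_ hp
      intro x
      constructor
      · intro hx
        obtain ⟨hxp, hxmin⟩ := (hm x).mp hx
        refine ⟨by simp [hxp], ?_⟩
        intro g hg hanc
        rcases List.mem_append.mp hg with hgp | hgd
        · exact hxmin g hgp hanc
        · have hgd' : g = d := by simpa using hgd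
          subst hgd'
          rcases hcond with heq | hde
          · exact hxmin e hep (heq ▸ hanc)
          · exact hxmin e hep (anc_trans hanc hde)
      · rintro ⟨hx, hxmin⟩
        rcases List.mem_append.mp hx with hxp | hxd
        · exact (hm x).mpr ⟨hxp, fun g hg => hxmin g (by simp [hg])⟩
        · have hxd' : x = d := by simpa using hxd
          subst hxd'
          rcases hcond with heq | hde
          · exact heq ▸ he
          · exact absurd hde (hxmin e (by simp [hep]))
    · -- insert: d survives, its descendants are filtered out
      have hfalse : acc.any (fun existing =>
          d == existing || PySem.Str.endswith d ("." ++ existing)) = false := by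
        rw [Bool.eq_false_iff]; exact hskip
      have hns : ∀ e ∈ acc, ¬ (d = e ∨ ancP d e) := by
        intro e he
        have := List.any_eq_false.mp hfalse e he
        rw [← cond_iff d e]; simpa using this
      have hstep : stepA acc d =
          acc.filter (fun e => ! PySem.Str.endswith e ("." ++ d)) ++ [d] := by
        unfold stepA; rw [if_neg hskip]
      have hmind : MinP d p := by
        intro g hg hanc
        obtain ⟨f, hf, hfmin, hcase⟩ := exists_min p g.toList.length g hg le_rfl
        have hfacc : f ∈ acc := (hm f).mpr ⟨hf, hfmin⟩
        have hdf : ancP d f := by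
          rcases hcase with rfl | h2
          · exact hanc
          · exact anc_trans hanc h2
        exact hns f hfacc (Or.inr hdf)
      have hmind' : MinP d (p ++ [d]) := by
        intro g hg hanc
        rcases List.mem_append.mp hg with hgp | hgd
        · exact hmind g hgp hanc
        · have hgd' : g = d := by simpa using hgd
          exact anc_irrefl d (hgd' ▸ hanc)
      have hm' : ∀ x, x ∈ stepA acc d ↔ x ∈ p ++ [d] ∧ MinP x (p ++ [d]) := by
        intro x
        rw [hstep]
        constructor
        · intro hx
          rcases List.mem_append.mp hx with hxf | hxd
          · obtain ⟨hxacc, hcondx⟩ := List.mem_filter.mp hxf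
            rw [fcond_iff] at hcondx
            obtain ⟨hxp, hxmin⟩ := (hm x).mp hxacc
            refine ⟨by simp [hxp], ?_⟩
            intro g hg hanc
            rcases List.mem_append.mp hg with hgp | hgd
            · exact hxmin g hgp hanc
            · have : g = d := by simpa using hgd
              subst this; exact hcondx hanc
          · have hxd' : x = d := by simpa using hxd
            subst hxd'
            exact ⟨by simp, hmind'⟩
        · rintro ⟨hx, hxmin⟩
          rcases List.mem_append.mp hx with hxp | hxd
          · refine List.mem_append.mpr (Or.inl ?_)
            refine List.mem_filter.mpr ⟨(hm x).mpr ⟨hxp, fun g hg => hxmin g (by simp [hg])⟩, ?_⟩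
            rw [fcond_iff]
            exact hxmin d (by simp)
          · have hxd' : x = d := by simpa using hxd
            subst hxd'
            exact List.mem_append.mpr (Or.inr (by simp))
      have hp' : (stepA acc d).Pairwise (· < ·) := by
        rw [hstep]
        rw [List.pairwise_append]
        refine ⟨hp.filter _, by simp, ?_⟩
        intro a ha b hb
        have hb' : b = d := by simpa using hb
        rw [hb']
        have haacc : a ∈ acc := (List.mem_filter.mp ha).1
        have hap : a ∈ p := ((hm a).mp haacc).1
        have hne : a ≠ d := fun h => hns a haacc (Or.inl h.symm)
        exact lt_of_le_of_ne (hle a hap) hne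
      exact ih (p ++ [d]) (stepA acc d) hs' hm' hp'

-- B's keep-test detects exactly the existence of a dot-ancestor in the input set
theorem anyB_iff (domains : List String) (d : String) :
    ((PySem.List.enumerate d.toList).any (fun ic =>
        ic.2 == '.' && PySem.Set.contains (PySem.Set.ofList domains)
          (PySem.Str.slice d (some (ic.1 + 1)) none))) = true
      ↔ ∃ e ∈ domains, ancP d e := by
  have hslice : ∀ k : Nat, (PySem.Str.slice d (some ((k : Int) + 1)) none).toList
      = d.toList.drop (k + 1) := by
    intro k
    simp only [PySem.Str.toList_slice, PySem.Chars.slice_eq_listSlice]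
    rw [show ((k : Int) + 1) = ((k + 1 : Nat) : Int) by push_cast; ring,
      PySem.List.slice_from_natCast]
  rw [List.any_eq_true]
  constructor
  · rintro ⟨ic, hmem, hcond⟩
    obtain ⟨k, hk, rfl⟩ := (PySem.List.mem_enumerate_iff _ _ _).mp hmem
    simp only [zero_add, Bool.and_eq_true, beq_iff_eq] at hcond
    obtain ⟨hdot, hcont⟩ := hcond
    set s := PySem.Str.slice d (some ((k : Int) + 1)) none with hsdef
    have hsl : s.toList = d.toList.drop (k + 1) := hslice k
    have hsmem : s ∈ domains := by
      have := (PySem.Set.contains_iff _ _).mp hcont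
      rwa [PySem.Set.mem_ofList] at this
    refine ⟨s, hsmem, ?_⟩
    unfold ancP
    rw [hsl, show ('.' :: List.drop (k + 1) d.toList) = d.toList.drop k by
      rw [List.drop_eq_getElem_cons hk, hdot]]
    exact List.drop_suffix k d.toList
  · rintro ⟨e, he, t, ht⟩
    have hlt : t.length < d.toList.length := by
      rw [← ht]; simp
    have hdot0 : (t ++ '.' :: e.toList)[t.length]'(by simp) = '.' := by simp
    have hdot : d.toList[t.length]'hlt = '.' :=
      (List.getElem_of_eq ht.symm hlt).trans hdot0
    have hdropE : d.toList.drop (t.length + 1) = e.toList := by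
      rw [← ht, List.drop_append]
      simp
    refine ⟨((t.length : Int), '.'), ?_, ?_⟩
    · refine (PySem.List.mem_enumerate_iff _ _ _).mpr ⟨t.length, hlt, ?_⟩
      rw [hdot]; simp
    · simp only [Bool.and_eq_true, beq_iff_eq]
      refine ⟨by simp, ?_⟩
      have hsl : (PySem.Str.slice d (some ((t.length : Int) + 1)) none).toList = e.toList := by
        rw [hslice t.length, hdropE]
      have hseq : PySem.Str.slice d (some ((t.length : Int) + 1)) none = e :=
        String.toList_inj.mp hsl
      rw [hseq]
      exact (PySem.Set.contains_iff _ _).mpr ((PySem.Set.mem_ofList _ _).mpr he)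

-- ===== VERDICT (by name: the statement is the Claim_ definition above) =====
theorem collapse_domains_spec : Claim_equal_collapse_domains := by
  intro domains _
  unfold Spec_collapse_domains
  rw [collapse_domains_eq]
  set sd := PySem.List.sorted domains (fun x => x) false with hsd
  set r := sd.foldl stepA [] with hr
  have hsort : sd.Pairwise (· ≤ ·) := by
    simpa using PySem.List.sorted_pairwise (xs := domains) (key := fun x => x)
  obtain ⟨hmem, hpw⟩ := fold_inv sd [] [] (by simpa using hsort)
    (by intro x; simp) (by simp)
  simp only [List.nil_append] at hmem
  have hms : ∀ y, y ∈ sd ↔ y ∈ domains := fun y => PySem.List.mem_sorted _ _ _ _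
  have hr_mem : ∀ x, x ∈ r ↔ x ∈ domains ∧ MinP x domains := by
    intro x
    rw [hmem x, hms x]
    constructor
    · rintro ⟨h1, h2⟩; exact ⟨h1, fun e he => h2 e ((hms e).mpr he)⟩
    · rintro ⟨h1, h2⟩; exact ⟨h1, fun e he => h2 e ((hms e).mp he)⟩
  show r = collapse_domains_alt domains
  unfold collapse_domains_alt
  simp only []
  set kept : List String := (PySem.Set.ofList domains).filter (fun d =>
    ! (PySem.List.enumerate d.toList).any (fun ic =>
        ic.2 == '.' && PySem.Set.contains (PySem.Set.ofList domains)
          (PySem.Str.slice d (some (ic.1 + 1)) none))) with hkept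
  have hkeep : ∀ x : String, (! (PySem.List.enumerate x.toList).any (fun ic =>
      ic.2 == '.' && PySem.Set.contains (PySem.Set.ofList domains)
        (PySem.Str.slice x (some (ic.1 + 1)) none))) = true ↔ MinP x domains := by
    intro x
    rw [Bool.not_eq_true', Bool.eq_false_iff, Ne, anyB_iff domains x]
    constructor
    · intro h e he hanc; exact h ⟨e, he, hanc⟩
    · rintro h ⟨e, he, hanc⟩; exact h e he hanc
  have hkept_mem : ∀ x, x ∈ kept ↔ x ∈ domains ∧ MinP x domains := by
    intro x
    rw [hkept, List.mem_filter, PySem.Set.mem_ofList, hkeep x]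
  have hnd_kept : kept.Nodup := (PySem.Set.nodup_ofList domains).filter _
  have hnd_r : r.Nodup := hpw.imp (fun h => ne_of_lt h)
  have hperm : r.Perm kept := (List.perm_ext_iff_of_nodup hnd_r hnd_kept).mpr
    (fun a => (hr_mem a).trans (hkept_mem a).symm)
  exact (PySem.List.sorted_eq_of_perm_of_pairwise_lt kept r (fun x => x) hperm hpw).symm
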